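-- pv_equiv track=rewrite | github.com/CodingKodama/adventofcode | 2019/1/day_1b.py | calcTotalWeight
-- ===== SOURCE A (Python) =====
-- def getFuelWeight(moduleWeight):
-- 	return moduleWeight//3-2
--
-- def calcTotalWeight(modules):
-- 	total = 0
-- 	for module in modules:
-- 		additionalFuel = getFuelWeight(int(module))
-- 		while additionalFuel > 0:
-- 			total += additionalFuel
-- 			additionalFuel = getFuelWeight(additionalFuel)
-- 	return total
-- ===== SOURCE B (Python) =====
-- def recursiveFuel(w):
--     f = w // 3 - 2
--     if f <= 0:
--         return 0
--     return f + recursiveFuel(f)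
--
-- def calcTotalWeight(modules):
--     return sum(recursiveFuel(int(module)) for module in modules)
-- ===== Notes on version B (the rewrite author's own statement) =====
-- stated objective: simpler
-- what changed: Replaces A's shared-accumulator while-loop inside a for-loop with a per-module recursive helper recursiveFuel and a single sum over the modules.
import Mathlib
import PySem

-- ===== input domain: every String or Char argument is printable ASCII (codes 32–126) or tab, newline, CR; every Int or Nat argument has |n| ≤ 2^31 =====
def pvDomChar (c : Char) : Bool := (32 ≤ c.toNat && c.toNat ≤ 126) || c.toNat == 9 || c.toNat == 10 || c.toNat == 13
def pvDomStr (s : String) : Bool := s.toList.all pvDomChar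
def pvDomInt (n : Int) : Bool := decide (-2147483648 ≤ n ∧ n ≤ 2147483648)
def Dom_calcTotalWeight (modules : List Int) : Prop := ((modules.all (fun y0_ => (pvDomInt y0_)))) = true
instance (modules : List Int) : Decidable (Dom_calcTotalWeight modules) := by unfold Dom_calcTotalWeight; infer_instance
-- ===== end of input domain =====

-- B replaces A's accumulator while-loop with a per-module recursive helper summed over the list (objective: simpler).
-- ===== PORT A =====
def getFuelWeight (moduleWeight : Int) : Int := PySem.Int.floordiv moduleWeight 3 - 2

-- the inner 'while additionalFuel > 0' loop of A
def pvWhileA (total additionalFuel : Int) : Int :=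
  if additionalFuel > 0 then
    pvWhileA (total + additionalFuel) (getFuelWeight additionalFuel)
  else total
termination_by additionalFuel.toNat
decreasing_by
  have h3 : PySem.Int.floordiv additionalFuel 3 = additionalFuel / 3 :=
    PySem.Int.floordiv_eq_ediv_of_pos (by omega)
  simp only [getFuelWeight, h3]; omega

def calcTotalWeight (modules : List Int) : Int :=
  modules.foldl (fun total module => pvWhileA total (getFuelWeight module)) 0

-- ===== PORT B =====
def recursiveFuel (w : Int) : Int :=
  let f := PySem.Int.floordiv w 3 - 2
  if f ≤ 0 then 0 else f + recursiveFuel f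
termination_by w.toNat
decreasing_by
  have h3 : PySem.Int.floordiv w 3 = w / 3 :=
    PySem.Int.floordiv_eq_ediv_of_pos (by omega)
  simp only [f, h3] at *; omega

def calcTotalWeight_alt (modules : List Int) : Int :=
  (modules.map recursiveFuel).sum

-- ===== PRECONDITION & SPEC =====
def Spec_calcTotalWeight (modules : List Int) (out : Int) : Prop := out = calcTotalWeight_alt modules
instance (modules : List Int) (out : Int) : Decidable (Spec_calcTotalWeight modules out) := by unfold Spec_calcTotalWeight; infer_instance

-- ===== CLAIM (what is proved, stated in full; the proofs are below) =====
def Claim_equal_calcTotalWeight : Prop := ∀ (modules : List Int), Dom_calcTotalWeight modules → Spec_calcTotalWeight modules (calcTotalWeight modules)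

-- ===== LEMMAS AND PROOFS =====

theorem pvWhileA_shift (fuel total : Int) : pvWhileA total fuel = total + pvWhileA 0 fuel := by
  unfold pvWhileA
  split_ifs with hf
  · rw [pvWhileA_shift (getFuelWeight fuel) (total + fuel),
        pvWhileA_shift (getFuelWeight fuel) (0 + fuel)]
    ring
  · ring
termination_by fuel.toNat
decreasing_by
  all_goals
    have h3 : PySem.Int.floordiv fuel 3 = fuel / 3 :=
      PySem.Int.floordiv_eq_ediv_of_pos (by omega)
    simp only [getFuelWeight, h3] at *
    omega

theorem recursiveFuel_eq_while (w : Int) : recursiveFuel w = pvWhileA 0 (getFuelWeight w) := by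
  unfold recursiveFuel
  simp only []
  split_ifs with hf
  · rw [pvWhileA, if_neg (by simp only [getFuelWeight]; omega)]
  · rw [pvWhileA, if_pos (by simp only [getFuelWeight]; omega),
        pvWhileA_shift, recursiveFuel_eq_while]
    simp only [getFuelWeight]
    ring
termination_by w.toNat
decreasing_by
  have h3 : PySem.Int.floordiv w 3 = w / 3 :=
    PySem.Int.floordiv_eq_ediv_of_pos (by omega)
  simp only [h3] at hf ⊢
  omega

theorem foldl_while_eq_sum (modules : List Int) (t : Int) :
    modules.foldl (fun total module => pvWhileA total (getFuelWeight module)) t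
      = t + (modules.map recursiveFuel).sum := by
  induction modules generalizing t with
  | nil => simp
  | cons m ms ih =>
      simp only [List.foldl_cons, List.map_cons, List.sum_cons, ih,
        pvWhileA_shift (getFuelWeight m) t, recursiveFuel_eq_while]
      ring

-- ===== VERDICT (by name: the statement is the Claim_ definition above) =====
theorem calcTotalWeight_spec : Claim_equal_calcTotalWeight := by
  intro modules _
  unfold Spec_calcTotalWeight calcTotalWeight calcTotalWeight_alt
  simpa using foldl_while_eq_sum modules 0
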